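-- pv_equiv track=rewrite | github.com/R4yya/QR-Code-Generator | main.py | pad_encoded_data
-- ===== SOURCE A (Python) =====
-- def pad_encoded_data(pad_emi_cci_data_sequence, required_bits):
--     # Add terminator of up to four 0s if necessary
--     if len(pad_emi_cci_data_sequence) < required_bits:
--         terminator_length = min(4, required_bits - len(pad_emi_cci_data_sequence))
--         pad_emi_cci_data_sequence += '0' * terminator_length
--
--     # Add more 0s to make the length a multiple of 8
--     if len(pad_emi_cci_data_sequence) % 8 != 0:
--         padding_length = 8 - (len(pad_emi_cci_data_sequence) % 8)
--         pad_emi_cci_data_sequence += '0' * padding_length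
--
--     # Add pad bytes if the string is still too short
--     while len(pad_emi_cci_data_sequence) < required_bits:
--         pad_emi_cci_data_sequence += '11101100'  # Pad byte 1
--         if len(pad_emi_cci_data_sequence) < required_bits:
--             pad_emi_cci_data_sequence += '00010001'  # Pad byte 2
--
--     return pad_emi_cci_data_sequence
-- ===== SOURCE B (Python) =====
-- def pad_encoded_data(pad_emi_cci_data_sequence, required_bits):
--     seq = pad_emi_cci_data_sequence
--     # terminator of up to four 0s
--     if len(seq) < required_bits:
--         seq += '0' * min(4, required_bits - len(seq))
--     # zero-pad to a byte boundary
--     r = len(seq) % 8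
--     if r:
--         seq += '0' * (8 - r)
--     # pad bytes by closed-form count: one 16-bit slice instead of a growing loop
--     if len(seq) < required_bits:
--         nbytes = -(-(required_bits - len(seq)) // 8)
--         seq += ('1110110000010001' * ((nbytes + 1) // 2))[:nbytes * 8]
--     return seq
-- ===== Notes on version B (the rewrite author's own statement) =====
-- stated objective: simpler
-- what changed: The while loop that grows the string one pad byte at a time (re-checking the length after each byte) is replaced by a closed-form ceiling-division count of the missing pad bytes and a single slice of the repeated 16-bit pad pattern.
import Mathlib
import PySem

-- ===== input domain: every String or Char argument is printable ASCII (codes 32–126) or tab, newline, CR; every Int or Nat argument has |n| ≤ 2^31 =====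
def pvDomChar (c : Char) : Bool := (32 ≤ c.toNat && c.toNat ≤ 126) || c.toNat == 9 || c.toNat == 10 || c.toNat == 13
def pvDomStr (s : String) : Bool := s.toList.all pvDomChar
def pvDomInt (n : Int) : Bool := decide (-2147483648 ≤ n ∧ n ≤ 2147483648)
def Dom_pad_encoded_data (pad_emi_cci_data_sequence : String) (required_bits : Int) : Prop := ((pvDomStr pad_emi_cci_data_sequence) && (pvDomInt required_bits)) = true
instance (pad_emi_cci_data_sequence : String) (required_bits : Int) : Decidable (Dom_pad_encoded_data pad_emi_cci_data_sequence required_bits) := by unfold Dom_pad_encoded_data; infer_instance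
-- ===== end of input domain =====

-- B replaces A's while loop by a closed-form pad-byte count and one slice of a repeated
-- 16-bit pattern (objective: simpler; same asymptotic cost).

-- ===== PORT A =====
-- the while loop of A: append pad byte 1, then pad byte 2 if still short, repeat
def padA_loop (rb : Int) (s : List Char) : List Char :=
  if (s.length : Int) < rb then
    -- append '11101100' (pad byte 1), then '00010001' (pad byte 2) if still short
    padA_loop rb
      (if (((s ++ ['1','1','1','0','1','1','0','0']).length : Int) < rb) then
        (s ++ ['1','1','1','0','1','1','0','0']) ++ ['0','0','0','1','0','0','0','1']
      else s ++ ['1','1','1','0','1','1','0','0'])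
  else s
termination_by (rb - s.length).toNat
decreasing_by
  split <;> simp only [List.length_append, List.length_cons, List.length_nil] <;> omega

def pad_encoded_data (pad_emi_cci_data_sequence : String) (required_bits : Int) : String :=
  let s0 := pad_emi_cci_data_sequence.toList
  -- terminator of up to four 0s ('0' * n with n ≥ 1 here, so .toNat is exact)
  let s1 := if (s0.length : Int) < required_bits then s0 ++ List.replicate (min 4 (required_bits - s0.length)).toNat '0' else s0
  -- zero padding to a multiple of 8
  let s2 := if PySem.Int.mod (s1.length : Int) 8 ≠ 0 then s1 ++ List.replicate (8 - PySem.Int.mod (s1.length : Int) 8).toNat '0' else s1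
  String.ofList (padA_loop required_bits s2)

-- ===== PORT B =====
def pad_encoded_data_alt (pad_emi_cci_data_sequence : String) (required_bits : Int) : String :=
  let s0 := pad_emi_cci_data_sequence.toList
  let s1 := if (s0.length : Int) < required_bits then s0 ++ List.replicate (min 4 (required_bits - s0.length)).toNat '0' else s0
  let s2 := if PySem.Int.mod (s1.length : Int) 8 ≠ 0 then s1 ++ List.replicate (8 - PySem.Int.mod (s1.length : Int) 8).toNat '0' else s1
  if (s2.length : Int) < required_bits then
    -- nbytes = -(-(required_bits - len(seq)) // 8): ceiling division, here ≥ 1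
    let nbytes := -(PySem.Int.floordiv (-(required_bits - s2.length)) 8)
    -- ('1110110000010001' * ((nbytes+1)//2))[:nbytes*8]; counts are ≥ 0, so replicate/take are exact
    String.ofList (s2 ++ (List.replicate (PySem.Int.floordiv (nbytes + 1) 2).toNat
        ['1','1','1','0','1','1','0','0','0','0','0','1','0','0','0','1']).flatten.take (nbytes * 8).toNat)
  else String.ofList s2

-- ===== PRECONDITION & SPEC =====
def Spec_pad_encoded_data (pad_emi_cci_data_sequence : String) (required_bits : Int) (out : String) : Prop := out = pad_encoded_data_alt pad_emi_cci_data_sequence required_bits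
instance (pad_emi_cci_data_sequence : String) (required_bits : Int) (out : String) : Decidable (Spec_pad_encoded_data pad_emi_cci_data_sequence required_bits out) := by unfold Spec_pad_encoded_data; infer_instance

-- ===== CLAIM (what is proved, stated in full; the proofs are below) =====
def Claim_equal_pad_encoded_data : Prop := ∀ (pad_emi_cci_data_sequence : String) (required_bits : Int), Dom_pad_encoded_data pad_emi_cci_data_sequence required_bits → Spec_pad_encoded_data pad_emi_cci_data_sequence required_bits (pad_encoded_data pad_emi_cci_data_sequence required_bits)

-- ===== LEMMAS AND PROOFS =====

-- A's loop appends exactly n alternating pad bytes, n = the ceiling count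
lemma padA_loop_eq : ∀ (n : Nat) (rb : Int) (s : List Char),
    rb - (s.length : Int) ≤ 8 * n → (n ≠ 0 → 8 * ((n : Int) - 1) < rb - (s.length : Int)) →
    padA_loop rb s = s ++ (List.replicate ((n + 1) / 2)
      ['1','1','1','0','1','1','0','0','0','0','0','1','0','0','0','1']).flatten.take (8 * n) := by
  intro n
  induction n using Nat.strong_induction_on with
  | _ n ih =>
    match n with
    | 0 =>
      intro rb s h1 h2
      rw [padA_loop, if_neg (by push_cast at h1 ⊢; omega)]
      simp
    | 1 =>
      intro rb s h1 h2
      have h2' := h2 (by omega)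
      rw [padA_loop, if_pos (by push_cast at h2' ⊢; omega),
        if_neg (by simp only [List.length_append, List.length_cons, List.length_nil]; push_cast at h1 ⊢; omega),
        padA_loop,
        if_neg (by simp only [List.length_append, List.length_cons, List.length_nil]; push_cast at h1 ⊢; omega)]
      simp
    | (m + 2) =>
      intro rb s h1 h2
      have h2' := h2 (by omega)
      rw [padA_loop, if_pos (by push_cast at h2' ⊢; omega),
        if_pos (by simp only [List.length_append, List.length_cons, List.length_nil]; push_cast at h2' ⊢; omega),
        ih m (by omega) rb _
          (by simp only [List.length_append, List.length_cons, List.length_nil]; push_cast at h1 ⊢; omega)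
          (by intro hm; simp only [List.length_append, List.length_cons, List.length_nil]; push_cast at h2' ⊢; omega)]
      have hrep : (m + 2 + 1) / 2 = (m + 1) / 2 + 1 := by omega
      rw [hrep, List.replicate_succ, List.flatten_cons, List.take_append]
      have h16 : List.take (8 * (m + 2))
          (['1','1','1','0','1','1','0','0','0','0','0','1','0','0','0','1'] : List Char)
          = ['1','1','1','0','1','1','0','0','0','0','0','1','0','0','0','1'] := by
        apply List.take_of_length_le; simp; omega
      rw [h16]
      have harith : 8 * (m + 2) - (['1','1','1','0','1','1','0','0','0','0','0','1','0','0','0','1'] : List Char).length = 8 * m := by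
        simp; omega
      rw [harith]
      simp

-- ===== VERDICT (by name: the statement is the Claim_ definition above) =====
theorem pad_encoded_data_spec : Claim_equal_pad_encoded_data := by
  intro p rb _
  simp only [Spec_pad_encoded_data, pad_encoded_data, pad_encoded_data_alt]
  generalize (if PySem.Int.mod ((if ((p.toList).length : Int) < rb then p.toList ++ List.replicate (min 4 (rb - (p.toList).length)).toNat '0' else p.toList).length : Int) 8 ≠ 0 then
      (if ((p.toList).length : Int) < rb then p.toList ++ List.replicate (min 4 (rb - (p.toList).length)).toNat '0' else p.toList) ++ List.replicate (8 - PySem.Int.mod ((if ((p.toList).length : Int) < rb then p.toList ++ List.replicate (min 4 (rb - (p.toList).length)).toNat '0' else p.toList).length : Int) 8).toNat '0'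
      else (if ((p.toList).length : Int) < rb then p.toList ++ List.replicate (min 4 (rb - (p.toList).length)).toNat '0' else p.toList)) = s2
  by_cases h : (s2.length : Int) < rb
  · rw [if_pos h]
    have hq := (PySem.Int.neg_floordiv_neg_eq_iff_of_pos (a := rb - (s2.length : Int))
        (b := 8) (q := -(PySem.Int.floordiv (-(rb - (s2.length : Int))) 8)) (by norm_num)).mp rfl
    generalize hnb : -(PySem.Int.floordiv (-(rb - (s2.length : Int))) 8) = nb at hq ⊢
    have hpos : 1 ≤ nb := by omega
    have hb1 : rb - (s2.length : Int) ≤ 8 * (nb.toNat : Int) := by omega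
    have hb2 : 8 * ((nb.toNat : Int) - 1) < rb - (s2.length : Int) := by omega
    have hcnt : (PySem.Int.floordiv (nb + 1) 2).toNat = (nb.toNat + 1) / 2 := by
      rw [PySem.Int.floordiv_eq_ediv_of_pos (by norm_num)]; omega
    have htake : (nb * 8).toNat = 8 * nb.toNat := by omega
    rw [padA_loop_eq nb.toNat rb s2 hb1 (fun _ => hb2), hcnt, htake]
  · rw [if_neg h]
    rw [padA_loop_eq 0 rb s2 (by push_cast; omega) (by intro h0; exact absurd rfl h0)]
    simp
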